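-- pv_equiv track=rewrite | github.com/ddr4869/backjoon | 프로그래머스/2/147354. 테이블 해시 함수/테이블 해시 함수.py | solution
-- ===== SOURCE A (Python) =====
-- def solution(data, col, row_begin, row_end):
--     data.sort(key=lambda x:(x[col-1], -x[0] ))
--     sum, bitwise=0, []
--     for row_idx in range(row_begin-1, row_end):
--         sum=0
--         for col in data[row_idx]:
--             sum+= col%(row_idx+1)
--         bitwise.append(sum)
--
--     for i in range(len(bitwise)-1):
--         bitwise[i+1] = bitwise[i] ^ bitwise[i+1]
--     return bitwise[-1]
-- ===== SOURCE B (Python) =====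
-- # B: same in-place sort, but the table hash is computed by a recursive
-- # divide-and-conquer XOR reduction over the row-index interval (valid because
-- # XOR is associative), with the row hash as a separate helper, instead of A's
-- # two staged loops (append per-row sums to a list, then an in-place prefix-XOR
-- # pass).  Like A, this sorts `data` in place.
-- def solution(data, col, row_begin, row_end):
--     data.sort(key=lambda x: (x[col-1], -x[0]))
--     return _xor_range(data, row_begin - 1, row_end)
--
-- def _xor_range(data, lo, hi):
--     # XOR of the hashes of rows with index in [lo, hi), hi - lo >= 1
--     if hi - lo == 1:
--         return _row_hash(data[lo], lo + 1)
--     mid = (lo + hi) // 2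
--     return _xor_range(data, lo, mid) ^ _xor_range(data, mid, hi)
--
-- def _row_hash(row, m):
--     return sum(c % m for c in row)
-- ===== Notes on version B (the rewrite author's own statement) =====
-- stated objective: alternative
-- what changed: Keeps the in-place sort but replaces A's two staged loops (build the list of per-row modular sums, then an in-place prefix-XOR pass ending in bitwise[-1]) by a recursive divide-and-conquer XOR reduction over the row-index interval, splitting at the midpoint, with the row hash as a separate helper; correct because XOR is associative.
import Mathlib
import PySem

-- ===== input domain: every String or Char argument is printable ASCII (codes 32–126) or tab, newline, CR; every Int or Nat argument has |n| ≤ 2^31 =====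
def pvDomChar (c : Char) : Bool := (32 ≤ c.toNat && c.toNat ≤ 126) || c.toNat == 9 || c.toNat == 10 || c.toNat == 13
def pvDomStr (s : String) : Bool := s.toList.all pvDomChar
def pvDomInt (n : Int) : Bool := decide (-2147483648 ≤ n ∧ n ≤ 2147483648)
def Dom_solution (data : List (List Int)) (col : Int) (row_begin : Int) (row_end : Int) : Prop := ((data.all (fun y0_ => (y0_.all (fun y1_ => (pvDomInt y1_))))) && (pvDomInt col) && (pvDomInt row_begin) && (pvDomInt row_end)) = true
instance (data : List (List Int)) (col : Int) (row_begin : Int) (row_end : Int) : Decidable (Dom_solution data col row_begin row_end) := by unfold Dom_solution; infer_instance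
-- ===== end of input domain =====

-- B keeps the sort but computes the hash by a recursive divide-and-conquer XOR
-- reduction over the row-index interval instead of A's two staged loops; both
-- Pythons sort `data` in place — the theorems are about the return value.

-- ===== PORT A =====
def solution (data : List (List Int)) (col : Int) (row_begin : Int) (row_end : Int) : Int :=
  let d := PySem.List.sorted2 data (fun x => PySem.List.pyGetD x (col - 1) 0)
            (fun x => -(PySem.List.pyGetD x 0 0))
  let bitwise := (PySem.List.pyRange (row_begin - 1) row_end 1).foldl
    (fun bw row_idx =>
      bw ++ [(PySem.List.pyGetD d row_idx []).foldl
               (fun s c => s + PySem.Int.mod c (row_idx + 1)) 0]) []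
  let bitwise2 := (PySem.List.pyRange 0 ((bitwise.length : Int) - 1) 1).foldl
    (fun bw i => PySem.List.pySetD bw (i + 1)
        (PySem.Int.bxor (PySem.List.pyGetD bw i 0) (PySem.List.pyGetD bw (i + 1) 0))) bitwise
  PySem.List.pyGetD bitwise2 (-1) 0

-- ===== PORT B =====
-- _row_hash(row, m) = sum(c % m for c in row)
def pvRowHash (row : List Int) (m : Int) : Int :=
  (row.map (fun c => PySem.Int.mod c m)).sum

-- _xor_range(data, lo, hi): divide-and-conquer XOR of row hashes on [lo, hi).
-- The final `else 0` branch (hi - lo ≤ 0) is a totality guard only: there the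
-- Python recurses forever (RecursionError), and Pre_ keeps the top-level range
-- nonempty, so it is never reached from solution_alt on admitted inputs.
def pvXorRange (d : List (List Int)) (lo hi : Int) : Int :=
  if hi - lo = 1 then pvRowHash (PySem.List.pyGetD d lo []) (lo + 1)
  else if _hgt : 1 < hi - lo then
    PySem.Int.bxor (pvXorRange d lo (PySem.Int.floordiv (lo + hi) 2))
                   (pvXorRange d (PySem.Int.floordiv (lo + hi) 2) hi)
  else 0
termination_by (hi - lo).toNat
decreasing_by
  · have h1 : lo + 1 ≤ PySem.Int.floordiv (lo + hi) 2 :=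
      (PySem.Int.le_floordiv_iff_mul_le (by omega)).mpr (by omega)
    have h2 : PySem.Int.floordiv (lo + hi) 2 < hi :=
      (PySem.Int.floordiv_lt_iff_lt_mul (by omega)).mpr (by omega)
    omega
  · have h1 : lo + 1 ≤ PySem.Int.floordiv (lo + hi) 2 :=
      (PySem.Int.le_floordiv_iff_mul_le (by omega)).mpr (by omega)
    have h2 : PySem.Int.floordiv (lo + hi) 2 < hi :=
      (PySem.Int.floordiv_lt_iff_lt_mul (by omega)).mpr (by omega)
    omega

def solution_alt (data : List (List Int)) (col : Int) (row_begin : Int) (row_end : Int) : Int :=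
  let d := PySem.List.sorted2 data (fun x => PySem.List.pyGetD x (col - 1) 0)
            (fun x => -(PySem.List.pyGetD x 0 0))
  pvXorRange d (row_begin - 1) row_end

-- ===== PRECONDITION & SPEC =====
-- Exactly the inputs on which the Python A returns: every row admits the sort-key
-- indices x[col-1] and x[0]; the row range is nonempty, all its indices are valid
-- for data, and it avoids -1 (where `% (row_idx+1)` would divide by zero).
def Pre_solution (data : List (List Int)) (col : Int) (row_begin : Int) (row_end : Int) : Prop :=
  (∀ row ∈ data, PySem.Raise.InRange row.length (col - 1)) ∧
  row_begin - 1 < row_end ∧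
  -(data.length : Int) ≤ row_begin - 1 ∧ row_end ≤ (data.length : Int) ∧
  (1 ≤ row_begin ∨ row_end ≤ -1)
instance (data : List (List Int)) (col : Int) (row_begin : Int) (row_end : Int) : Decidable (Pre_solution data col row_begin row_end) := by unfold Pre_solution; infer_instance

def pvWitness_solution : List (List Int) × Int × Int × Int := ([[1, 2], [3, 4]], 1, 1, 2)

def Spec_solution (data : List (List Int)) (col : Int) (row_begin : Int) (row_end : Int) (out : Int) : Prop := out = solution_alt data col row_begin row_end
instance (data : List (List Int)) (col : Int) (row_begin : Int) (row_end : Int) (out : Int) : Decidable (Spec_solution data col row_begin row_end out) := by unfold Spec_solution; infer_instance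

-- ===== CLAIM (what is proved, stated in full; the proofs are below) =====
def Claim_equal_solution : Prop := ∀ (data : List (List Int)) (col : Int) (row_begin : Int) (row_end : Int), Dom_solution data col row_begin row_end → Pre_solution data col row_begin row_end → Spec_solution data col row_begin row_end (solution data col row_begin row_end)

-- ===== LEMMAS AND PROOFS =====

-- the per-row modular sum A's inner loop computes
def pvRowF (d : List (List Int)) (i : Int) : Int :=
  (PySem.List.pyGetD d i []).foldl (fun s c => s + PySem.Int.mod c (i + 1)) 0

-- XOR of a list, seeded with 0 (the common value both programs reduce to)
def pvXfold (l : List Int) : Int := l.foldl PySem.Int.bxor 0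

theorem pv_bxor_zero_left (a : Int) : PySem.Int.bxor 0 a = a := by
  rw [PySem.Int.bxor_comm]; exact PySem.Int.bxor_zero a

theorem pv_bxor_assoc (a b c : Int) :
    PySem.Int.bxor (PySem.Int.bxor a b) c = PySem.Int.bxor a (PySem.Int.bxor b c) := by
  have h : ∀ x y : Int, PySem.Int.bxor x y = Int.xor x y := by
    intro x y
    unfold PySem.Int.bxor
    rcases x with m | m <;> rcases y with n | n <;> simp [Int.xor, Int.negSucc_eq] <;> omega
  simp only [h]
  rcases a with m | m <;> rcases b with n | n <;> rcases c with k | k <;>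
    simp [Int.xor, Nat.xor_assoc]

theorem pv_foldl_bxor (v : List Int) : ∀ a : Int,
    v.foldl PySem.Int.bxor a = PySem.Int.bxor a (pvXfold v) := by
  induction v with
  | nil => intro a; simp [pvXfold, PySem.Int.bxor_zero]
  | cons y t ih =>
      intro a
      simp only [pvXfold, List.foldl_cons, pv_bxor_zero_left] at *
      rw [ih (PySem.Int.bxor a y), ih y, pv_bxor_assoc]

theorem pv_xfold_append (u v : List Int) :
    pvXfold (u ++ v) = PySem.Int.bxor (pvXfold u) (pvXfold v) := by
  unfold pvXfold
  rw [List.foldl_append, pv_foldl_bxor v]; rfl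

theorem pv_rowhash (row : List Int) (m : Int) :
    pvRowHash row m = row.foldl (fun s c => s + PySem.Int.mod c m) 0 := by
  rw [PySem.List.foldl_add]; simp [pvRowHash]

-- B's divide-and-conquer reduction computes the XOR of the mapped range.
theorem pv_xorRange_eq (d : List (List Int)) : ∀ (n : Nat) (lo hi : Int),
    (hi - lo).toNat ≤ n → lo < hi →
    pvXorRange d lo hi = pvXfold ((PySem.List.pyRange lo hi 1).map (pvRowF d)) := by
  intro n
  induction n with
  | zero => intro lo hi hle hlt; omega
  | succ n ih =>
      intro lo hi hle hlt
      by_cases hone : hi - lo = 1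
      · have : hi = lo + 1 := by omega
        subst this
        rw [pvXorRange, if_pos hone, PySem.List.pyRange_one_singleton]
        simp [pvXfold, pv_bxor_zero_left, pv_rowhash, pvRowF]
      · have hgt : 1 < hi - lo := by omega
        have h1 : lo + 1 ≤ PySem.Int.floordiv (lo + hi) 2 :=
          (PySem.Int.le_floordiv_iff_mul_le (by omega)).mpr (by omega)
        have h2 : PySem.Int.floordiv (lo + hi) 2 < hi :=
          (PySem.Int.floordiv_lt_iff_lt_mul (by omega)).mpr (by omega)
        rw [pvXorRange, if_neg hone, dif_pos hgt]
        rw [PySem.List.pyRange_one_append lo (PySem.Int.floordiv (lo + hi) 2) hi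
              (by omega) (by omega), List.map_append, pv_xfold_append]
        rw [ih lo (PySem.Int.floordiv (lo + hi) 2) (by omega) (by omega),
            ih (PySem.Int.floordiv (lo + hi) 2) hi (by omega) (by omega)]

-- A's append loop builds the list of per-row sums.
theorem pv_append_loop (R : List Int) (f : Int → Int) (acc : List Int) :
    R.foldl (fun bw i => bw ++ [f i]) acc = acc ++ R.map f := by
  induction R generalizing acc with
  | nil => simp
  | cons x t ih => simp [List.foldl, ih]

-- The in-place prefix-XOR loop, run from position pre.length on pre ++ a :: rest,
-- ends with last element = XOR-fold of a over rest.
theorem pv_prefix_loop (rest : List Int) : ∀ (pre : List Int) (a : Int),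
    PySem.List.pyGetD
      ((PySem.List.pyRange (pre.length : Int) (((pre ++ a :: rest).length : Int) - 1) 1).foldl
        (fun bw i => PySem.List.pySetD bw (i + 1)
          (PySem.Int.bxor (PySem.List.pyGetD bw i 0) (PySem.List.pyGetD bw (i + 1) 0)))
        (pre ++ a :: rest)) (-1) 0
    = rest.foldl PySem.Int.bxor a := by
  induction rest with
  | nil =>
      intro pre a
      have h : ((pre ++ [a]).length : Int) - 1 = (pre.length : Int) := by
        simp
      rw [h, PySem.List.pyRange_one_eq_nil (le_refl _)]
      simp [PySem.List.pyGetD_neg_one_append_singleton]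
  | cons y rest ih =>
      intro pre a
      have hlen : ((pre ++ a :: y :: rest).length : Int) - 1
          = (pre.length : Int) + 1 + rest.length := by simp; omega
      have hlt : (pre.length : Int) < ((pre ++ a :: y :: rest).length : Int) - 1 := by
        rw [hlen]; omega
      rw [PySem.List.pyRange_one_cons hlt]
      simp only [List.foldl_cons]
      have hget0 : PySem.List.pyGetD (pre ++ a :: y :: rest) ((pre.length : Int)) 0 = a := by
        simp [PySem.List.pyGetD_natCast, List.getD]
      have hget1 : PySem.List.pyGetD (pre ++ a :: y :: rest) ((pre.length : Int) + 1) 0 = y := by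
        have : (pre.length : Int) + 1 = ((pre.length + 1 : Nat) : Int) := by push_cast; ring
        rw [this, PySem.List.pyGetD_natCast]
        have : pre ++ a :: y :: rest = (pre ++ [a]) ++ y :: rest := by simp
        rw [this, List.getD]
        rw [show pre.length + 1 = (pre ++ [a]).length by simp]
        simp
      have hset : PySem.List.pySetD (pre ++ a :: y :: rest) ((pre.length : Int) + 1)
            (PySem.Int.bxor a y)
          = (pre ++ [a]) ++ (PySem.Int.bxor a y) :: rest := by
        have : (pre.length : Int) + 1 = ((pre.length + 1 : Nat) : Int) := by push_cast; ring
        rw [this, PySem.List.pySetD_natCast]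
        have h2 : pre ++ a :: y :: rest = (pre ++ [a]) ++ y :: rest := by simp
        rw [h2]
        rw [show pre.length + 1 = (pre ++ [a]).length by simp]
        simp
      rw [hget0, hget1, hset]
      have hstart : (pre.length : Int) + 1 = (((pre ++ [a]).length : Nat) : Int) := by
        simp
      have hstop : ((pre ++ a :: y :: rest).length : Int) - 1
          = (((pre ++ [a]) ++ (PySem.Int.bxor a y) :: rest).length : Int) - 1 := by
        simp
      rw [hstart, hstop, ih (pre ++ [a]) (PySem.Int.bxor a y)]

-- ===== VERDICT (by name: the statement is the Claim_ definition above) =====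
theorem solution_spec : Claim_equal_solution := by
  intro data col row_begin row_end _hdom hpre
  obtain ⟨_hrows, hne, _h1, _h2, _h3⟩ := hpre
  unfold Spec_solution solution solution_alt
  set d := PySem.List.sorted2 data (fun x => PySem.List.pyGetD x (col - 1) 0)
            (fun x => -(PySem.List.pyGetD x 0 0)) with hd
  set f : Int → Int := fun row_idx =>
      (PySem.List.pyGetD d row_idx []).foldl
        (fun s c => s + PySem.Int.mod c (row_idx + 1)) 0 with hf
  set R := PySem.List.pyRange (row_begin - 1) row_end 1 with hR
  simp only
  rw [pv_append_loop R f [], List.nil_append]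
  have hB : pvXorRange d (row_begin - 1) row_end = pvXfold (R.map f) := by
    rw [pv_xorRange_eq d (row_end - (row_begin - 1)).toNat _ _ (le_refl _) hne]
    have hpf : pvRowF d = f := by funext i; rw [hf]; rfl
    rw [hR, hpf]
  rw [hB]
  have hRcons : R = (row_begin - 1) :: PySem.List.pyRange (row_begin - 1 + 1) row_end 1 :=
    PySem.List.pyRange_one_cons hne
  rw [hRcons]
  have key := pv_prefix_loop ((PySem.List.pyRange (row_begin - 1 + 1) row_end 1).map f)
      [] (f (row_begin - 1))
  simp only [List.nil_append] at key
  simp only [List.map_cons]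
  rw [show pvXfold (f (row_begin - 1) ::
        (PySem.List.pyRange (row_begin - 1 + 1) row_end 1).map f)
      = ((PySem.List.pyRange (row_begin - 1 + 1) row_end 1).map f).foldl
          PySem.Int.bxor (f (row_begin - 1)) by
    simp [pvXfold, pv_bxor_zero_left]]
  simpa using key
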